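-- pv_equiv track=rewrite | github.com/beOk91/programmers | level2/problem42578.py | solution
-- ===== SOURCE A (Python) =====
-- def solution(clothes):
--     answer = {}
--     item=set([])
--     for element in clothes:
--         answer[element[1]]= answer[element[1]]+1 if element[1] in answer else 1
--         item.add(element[1])
--     result=1
--     for element in item:
--         result*=answer[element]
--     return len(clothes) if len(item)==1 else result+len(clothes)
-- ===== SOURCE B (Python) =====
-- def solution(clothes):
--     rest = [e[1] for e in clothes]
--     prod = 1
--     groups = 0
--     while rest:
--         c = rest[0]
--         prod *= rest.count(c)
--         groups += 1
--         rest = [x for x in rest if x != c]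
--     return len(clothes) if groups == 1 else prod + len(clothes)
-- ===== Notes on version B (the rewrite author's own statement) =====
-- stated objective: alternative
-- what changed: B replaces A's dict-and-set counting pass by a partition recursion: it repeatedly takes the first remaining category, multiplies in its count, and filters it out, so no dictionary or set is maintained.
import Mathlib
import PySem

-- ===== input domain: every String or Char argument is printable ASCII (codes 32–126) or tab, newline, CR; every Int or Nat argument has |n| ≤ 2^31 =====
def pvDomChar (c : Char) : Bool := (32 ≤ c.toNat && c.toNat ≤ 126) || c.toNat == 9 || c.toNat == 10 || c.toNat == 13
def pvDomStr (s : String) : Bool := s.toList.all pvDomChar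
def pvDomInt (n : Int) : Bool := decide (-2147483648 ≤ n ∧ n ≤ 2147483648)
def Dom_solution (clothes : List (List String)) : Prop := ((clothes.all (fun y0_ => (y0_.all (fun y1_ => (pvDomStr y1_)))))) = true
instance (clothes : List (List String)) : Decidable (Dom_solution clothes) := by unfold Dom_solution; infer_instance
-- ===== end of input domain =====

-- B replaces A's dict+set counting by a partition loop (take first category, multiply its count, filter it out); same results, similar cost.


-- ===== PORT A =====
def solution (clothes : List (List String)) : Int :=
  let st := clothes.foldl
    (fun (st : PySem.Dict String Int × PySem.Set String) element =>
      match PySem.List.pyGet? element 1 with   -- element[1]; none = IndexError, outside Pre_solution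
      | some c =>
          (st.1.insert c (if st.1.contains c then (st.1.get? c).getD 0 + 1 else 1),
           PySem.Set.add st.2 c)
      | none => st)
    (PySem.Dict.empty, PySem.Set.empty)
  let answer := st.1
  let item := st.2
  let result := item.foldl (fun r element => r * (answer.get? element).getD 0) 1
  if PySem.Set.len item == 1 then (clothes.length : Int) else result + (clothes.length : Int)

-- ===== PORT B =====
-- e[1]; the "" default is unreachable under Pre_solution
def catOf (e : List String) : String := (PySem.List.pyGet? e 1).getD ""

def altLoop (rest : List String) (prod groups : Int) : Int × Int :=
  match rest with
  | [] => (prod, groups)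
  | c :: tl =>
      altLoop ((c :: tl).filter (fun x => !(x == c)))
        (prod * ((c :: tl).count c : Int)) (groups + 1)
  termination_by rest.length
  decreasing_by
    simp only [List.filter]
    simp only [beq_self_eq_true, Bool.not_true]
    have := List.length_filter_le (fun x => !(x == c)) tl
    simp only [List.length_cons]
    omega

def solution_alt (clothes : List (List String)) : Int :=
  let rest := clothes.map catOf
  let pg := altLoop rest 1 0
  if pg.2 == 1 then (clothes.length : Int) else pg.1 + (clothes.length : Int)

-- ===== PRECONDITION & SPEC =====
-- Pre_ excludes clothes items with fewer than two entries, on which A raises IndexError (element[1]).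
def Pre_solution (clothes : List (List String)) : Prop := ∀ e ∈ clothes, 2 ≤ e.length
instance (clothes : List (List String)) : Decidable (Pre_solution clothes) := by unfold Pre_solution; infer_instance

def pvWitness_solution : List (List String) := [["a", "shirt"], ["b", "shirt"], ["c", "hat"]]

def Spec_solution (clothes : List (List String)) (out : Int) : Prop := out = solution_alt clothes
instance (clothes : List (List String)) (out : Int) : Decidable (Spec_solution clothes out) := by unfold Spec_solution; infer_instance

-- ===== CLAIM (what is proved, stated in full; the proofs are below) =====
def Claim_equal_solution : Prop := ∀ (clothes : List (List String)), Dom_solution clothes → Pre_solution clothes → Spec_solution clothes (solution clothes)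

-- ===== LEMMAS AND PROOFS =====

theorem pyGet1_eq (e : List String) (h : 2 ≤ e.length) :
    PySem.List.pyGet? e 1 = some (catOf e) := by
  have h1 : (1 : Nat) < e.length := by omega
  have hc : PySem.List.pyGet? e 1 = e[1]? := by
    simpa using PySem.List.pyGet?_natCast (xs := e) (n := 1)
  rw [hc, List.getElem?_eq_getElem h1]
  simp [catOf, hc, List.getElem?_eq_getElem h1]

-- A's combined dict/set pass over clothes, reduced to two folds over the category list
theorem foldA_eq (clothes : List (List String)) (h : ∀ e ∈ clothes, 2 ≤ e.length)
    (d : PySem.Dict String Int) (s : PySem.Set String) :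
    clothes.foldl
      (fun (st : PySem.Dict String Int × PySem.Set String) element =>
        match PySem.List.pyGet? element 1 with
        | some c =>
            (st.1.insert c (if st.1.contains c then (st.1.get? c).getD 0 + 1 else 1),
             PySem.Set.add st.2 c)
        | none => st) (d, s)
    = ((clothes.map catOf).foldl (fun d c => d.insert c (d.getD c 0 + 1)) d,
       (clothes.map catOf).foldl PySem.Set.add s) := by
  induction clothes generalizing d s with
  | nil => rfl
  | cons e tl ih =>
      have he : 2 ≤ e.length := h e (by simp)
      simp only [List.foldl_cons, List.map_cons, pyGet1_eq e he]
      have hval : (d.insert (catOf e) (if d.contains (catOf e) then (d.get? (catOf e)).getD 0 + 1 else 1))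
          = d.insert (catOf e) (d.getD (catOf e) 0 + 1) := by
        by_cases hc : d.contains (catOf e) = true
        · simp [hc, PySem.Dict.getD_eq_get?_getD]
        · have hc' : d.contains (catOf e) = false := by simpa using hc
          have hg : d.getD (catOf e) 0 = 0 := PySem.Dict.getD_of_not_contains d 0 hc'
          simp [hc', hg]
      rw [hval]
      exact ih (fun e' he' => h e' (by simp [he'])) _ _

theorem foldl_mul_map (l : List String) (f : String → Int) (a : Int) :
    l.foldl (fun r c => r * f c) a = a * (l.map f).prod := by
  induction l generalizing a with
  | nil => simp
  | cons x tl ih => simp [List.foldl_cons, ih, mul_assoc]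

-- skipping adds of an element already in the accumulator = filtering it out first
theorem foldl_add_filter (xs : List String) (c : String) :
    ∀ acc : PySem.Set String, c ∈ acc →
      xs.foldl PySem.Set.add acc = (xs.filter (fun x => !(x == c))).foldl PySem.Set.add acc := by
  induction xs with
  | nil => intro acc _; rfl
  | cons x tl ih =>
      intro acc hc
      by_cases hx : x = c
      · subst hx
        simp only [List.filter_cons, beq_self_eq_true, Bool.not_true, List.foldl_cons]
        rw [PySem.Set.add_of_mem hc]
        exact ih acc hc
      · have hb : (x == c) = false := by simpa using hx
        simp only [List.filter_cons, hb, Bool.not_false, List.foldl_cons]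
        exact ih _ (by rw [PySem.Set.mem_add]; exact Or.inl hc)

theorem foldl_add_cons (xs : List String) (c : String) (h : ∀ x ∈ xs, x ≠ c) :
    ∀ s : PySem.Set String, xs.foldl PySem.Set.add (c :: s) = c :: xs.foldl PySem.Set.add s := by
  induction xs with
  | nil => intro s; rfl
  | cons x tl ih =>
      intro s
      have hx : x ≠ c := h x (by simp)
      simp only [List.foldl_cons]
      have : PySem.Set.add (c :: s) x = c :: PySem.Set.add s x := by
        rw [PySem.Set.add_eq_ite, PySem.Set.add_eq_ite]
        by_cases hm : x ∈ s
        · simp [hm, hx]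
        · have : x ∈ (c :: s) ↔ False := by simp [hm, hx]
          simp [hm, this]
      rw [this]
      exact ih (fun y hy => h y (by simp [hy])) _

theorem dedup_cons_filter (c : String) (tl : List String) :
    PySem.List.dedup (c :: tl)
      = c :: PySem.List.dedup (tl.filter (fun x => !(x == c))) := by
  have h1 : PySem.List.dedup (c :: tl) = (c :: tl).foldl PySem.Set.add [] := by
    rw [PySem.List.dedup_eq_ofList, PySem.Set.ofList_eq_foldl]
  have h2 : PySem.List.dedup (tl.filter (fun x => !(x == c)))
      = (tl.filter (fun x => !(x == c))).foldl PySem.Set.add [] := by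
    rw [PySem.List.dedup_eq_ofList, PySem.Set.ofList_eq_foldl]
  rw [h1, h2]
  simp only [List.foldl_cons]
  have hadd : PySem.Set.add ([] : PySem.Set String) c = [c] := by
    rw [PySem.Set.add_eq_ite]; simp
  rw [hadd]
  rw [foldl_add_filter tl c [c] (by simp)]
  exact foldl_add_cons _ c (by intro x hx; have := List.of_mem_filter hx; simpa using this) _

theorem count_filter_ne (tl : List String) (c c' : String) (h : c' ≠ c) :
    (tl.filter (fun x => !(x == c))).count c' = tl.count c' := by
  induction tl with
  | nil => rfl
  | cons x t ih =>
      by_cases hx : x = c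
      · subst hx
        simp [List.filter_cons, List.count_cons, Ne.symm h, ih]
      · have hb : (x == c) = false := by simpa using hx
        simp [List.filter_cons, hb, List.count_cons, ih]

theorem altLoop_eq (l : List String) (p g : Int) :
    altLoop l p g
      = (p * ((PySem.List.dedup l).map (fun c => (l.count c : Int))).prod,
         g + (PySem.List.dedup l).length) := by
  induction hn : l.length using Nat.strong_induction_on generalizing l p g with
  | _ n ih =>
    cases l with
    | nil => simp [altLoop, PySem.List.dedup]
    | cons c tl =>
        rw [altLoop]
        have hfl : (c :: tl).filter (fun x => !(x == c)) = tl.filter (fun x => !(x == c)) := by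
          simp [List.filter_cons]
        have hlen : (tl.filter (fun x => !(x == c))).length < n := by
          have := List.length_filter_le (fun x => !(x == c)) tl
          simp only [List.length_cons] at hn; omega
        rw [hfl, ih _ hlen _ _ _ rfl]
        rw [dedup_cons_filter]
        simp only [List.map_cons, List.prod_cons, List.length_cons, Prod.mk.injEq]
        constructor
        · -- products
          have hmap : (PySem.List.dedup (tl.filter (fun x => !(x == c)))).map
                (fun c' => ((tl.filter (fun x => !(x == c))).count c' : Int))
              = (PySem.List.dedup (tl.filter (fun x => !(x == c)))).map
                (fun c' => ((c :: tl).count c' : Int)) := by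
            apply List.map_congr_left
            intro x hx
            have hxm : x ∈ tl.filter (fun x => !(x == c)) := by
              rw [← PySem.List.mem_dedup]; exact hx
            have hne : x ≠ c := by
              have := List.of_mem_filter hxm; simpa using this
            rw [count_filter_ne tl c x hne, List.count_cons]
            simp [Ne.symm hne]
          rw [hmap]
          ring
        · push_cast
          ring


-- ===== VERDICT (by name: the statement is the Claim_ definition above) =====
theorem solution_spec : Claim_equal_solution := by
  intro clothes _ hpre
  unfold Spec_solution
  simp only [solution, solution_alt]
  rw [foldA_eq clothes hpre, altLoop_eq]
  have hdict : (clothes.map catOf).foldl (fun d c => d.insert c (d.getD c 0 + 1)) PySem.Dict.empty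
      = PySem.Dict.counter (clothes.map catOf) :=
    PySem.Dict.foldl_insert_getD_add_one_eq_counter (clothes.map catOf)
  have hset : (clothes.map catOf).foldl PySem.Set.add PySem.Set.empty
      = PySem.List.dedup (clothes.map catOf) := by
    rw [PySem.List.dedup_eq_ofList, PySem.Set.ofList_eq_foldl]; rfl
  rw [hdict, hset]
  rw [foldl_mul_map]
  have hm : (PySem.List.dedup (clothes.map catOf)).map
        (fun c => ((PySem.Dict.counter (clothes.map catOf)).get? c).getD 0)
      = (PySem.List.dedup (clothes.map catOf)).map
        (fun c => ((clothes.map catOf).count c : Int)) := by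
    apply List.map_congr_left
    intro x _
    rw [← PySem.Dict.getD_eq_get?_getD, PySem.Dict.getD_counter]
  rw [hm]
  simp [PySem.Set.len]
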